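-- pv_equiv track=rewrite | github.com/gmoshkin/dotfiles | scripts/puzzle-fighter.py | drop_gems
-- ===== SOURCE A (Python) =====
-- def drop_gems(game_state, modified_cols):
--     something_dropped = False
--     for x in modified_cols:
--         col = game_state[x]
--         nonempty = [cell for cell in col if cell != ' ']
--         if not all(new == old for new, old in zip(nonempty, col)):
--             something_dropped = True
--             col[:] = nonempty + [' '] * (len(col) - len(nonempty))
--
--     return something_dropped
-- ===== SOURCE B (Python) =====
-- def drop_gems(game_state, modified_cols):
--     something_dropped = False
--     for x in modified_cols:
--         col = game_state[x]
--         write = 0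
--         moved = False
--         for read in range(len(col)):
--             if col[read] != ' ':
--                 if read != write:
--                     moved = True
--                 col[write] = col[read]
--                 write += 1
--         col[write:] = [' '] * (len(col) - write)
--         something_dropped = something_dropped or moved
--     return something_dropped
-- ===== Notes on version B (the rewrite author's own statement) =====
-- stated objective: alternative
-- what changed: Replaces A's per-column build-a-filtered-copy, zip-compare-with-original, then rebuild-and-slice-assign by an in-place two-pointer compaction: a write cursor advances over a single scan, each gem is written back at the cursor (moved flag set when read != write), and the tail is blanked once.
import Mathlib
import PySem

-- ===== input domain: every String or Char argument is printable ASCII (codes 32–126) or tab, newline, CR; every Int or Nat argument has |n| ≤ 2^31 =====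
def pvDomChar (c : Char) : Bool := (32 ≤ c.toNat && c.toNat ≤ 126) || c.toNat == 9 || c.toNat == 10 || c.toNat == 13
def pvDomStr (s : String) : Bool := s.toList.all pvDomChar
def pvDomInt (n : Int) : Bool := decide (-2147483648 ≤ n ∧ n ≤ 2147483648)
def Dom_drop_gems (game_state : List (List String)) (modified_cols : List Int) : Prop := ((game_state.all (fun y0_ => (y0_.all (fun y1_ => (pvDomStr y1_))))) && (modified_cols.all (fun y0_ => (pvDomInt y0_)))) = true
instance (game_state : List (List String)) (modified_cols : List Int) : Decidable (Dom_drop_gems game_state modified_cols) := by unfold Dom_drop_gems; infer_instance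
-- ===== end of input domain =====

-- B replaces A's build-a-filtered-copy + zip-compare + rebuild per column by an in-place
-- two-pointer compaction with a write cursor (objective: alternative decomposition).
-- Both A and B leave game_state's columns with identical contents; theorems are about the return value.

-- ===== PORT A =====
-- state: (current game_state, something_dropped)
def drop_gems (game_state : List (List String)) (modified_cols : List Int) : Bool :=
  (modified_cols.foldl (fun (st : List (List String) × Bool) x =>
      match PySem.List.pyGet? st.1 x with
      | none => st  -- IndexError: excluded by Pre_
      | some col =>
        let nonempty := col.filter (fun cell => !(cell == " "))
        if ((nonempty.zip col).all (fun p => p.1 == p.2)) then st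
        else
          let i := (if x < 0 then x + (st.1.length : Int) else x).toNat
          (st.1.set i (nonempty ++ List.replicate (col.length - nonempty.length) " "), true))
    (game_state, false)).2

-- ===== PORT B =====
-- inner loop body of B: state (col, write, moved); read index is always in range, so getD is exact
def pvStepB (st : List String × Nat × Bool) (read : Nat) : List String × Nat × Bool :=
  let cell := st.1.getD read " "
  if cell == " " then st
  else (st.1.set st.2.1 cell, st.2.1 + 1, st.2.2 || decide (read ≠ st.2.1))

def drop_gems_alt (game_state : List (List String)) (modified_cols : List Int) : Bool :=
  (modified_cols.foldl (fun (st : List (List String) × Bool) x =>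
      match PySem.List.pyGet? st.1 x with
      | none => st  -- IndexError: excluded by Pre_
      | some col =>
        let r := (List.range col.length).foldl pvStepB (col, 0, false)
        let i := (if x < 0 then x + (st.1.length : Int) else x).toNat
        -- col[write:] = [' '] * (len(col) - write)
        (st.1.set i (r.1.take r.2.1 ++ List.replicate (col.length - r.2.1) " "), st.2 || r.2.2))
    (game_state, false)).2

-- ===== PRECONDITION & SPEC =====
-- Pre_: every column index is in range for Python indexing (A raises IndexError otherwise).
def Pre_drop_gems (game_state : List (List String)) (modified_cols : List Int) : Prop :=
  ∀ x ∈ modified_cols, PySem.Raise.InRange game_state.length x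
instance (game_state : List (List String)) (modified_cols : List Int) : Decidable (Pre_drop_gems game_state modified_cols) := by unfold Pre_drop_gems; infer_instance
def pvWitness_drop_gems : List (List String) × List Int := ([[" ", "a"], ["b"]], [0, -1])

def Spec_drop_gems (game_state : List (List String)) (modified_cols : List Int) (out : Bool) : Prop := out = drop_gems_alt game_state modified_cols
instance (game_state : List (List String)) (modified_cols : List Int) (out : Bool) : Decidable (Spec_drop_gems game_state modified_cols out) := by unfold Spec_drop_gems; infer_instance

-- ===== CLAIM =====
def Claim_equal_drop_gems : Prop := ∀ (game_state : List (List String)) (modified_cols : List Int), Dom_drop_gems game_state modified_cols → Pre_drop_gems game_state modified_cols → Spec_drop_gems game_state modified_cols (drop_gems game_state modified_cols)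

-- ===== LEMMAS AND PROOFS =====

-- "a gem occurs after a blank" predicate (the pure value of B's moved flag)
def pvGemAfterBlank : List String → Bool
  | [] => false
  | c :: cs => ((c == " ") && cs.any (fun d => !(d == " "))) || pvGemAfterBlank cs

lemma pvGemAfterBlank_of_no_gem (cs : List String)
    (h : cs.any (fun d => !(d == " ")) = false) : pvGemAfterBlank cs = false := by
  induction cs with
  | nil => rfl
  | cons c cs ih =>
    simp only [List.any_cons, Bool.or_eq_false_iff] at h
    simp [pvGemAfterBlank, h.2, ih h.2]

lemma pvGemAfterBlank_snoc (l : List String) (a : String) :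
    pvGemAfterBlank (l ++ [a]) =
      (pvGemAfterBlank l || ((!(a == " ")) && l.any (fun c => c == " "))) := by
  induction l with
  | nil => simp [pvGemAfterBlank]
  | cons c cs ih =>
    simp only [List.cons_append, pvGemAfterBlank, List.any_append, List.any_cons,
      List.any_nil, ih]
    cases hc : (c == " ") <;> cases pvGemAfterBlank cs <;>
      cases ha : cs.any (fun d => !(d == " ")) <;>
      cases ha' : cs.any (fun d => d == " ") <;> cases hna : (a == " ") <;> simp_all

-- blank existence expressed through the nonblank count
lemma any_blank_eq (l : List String) :
    l.any (fun c => c == " ") = decide (l.countP (fun c => !(c == " ")) ≠ l.length) := by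
  induction l with
  | nil => simp
  | cons c cs ih =>
    have hle : cs.countP (fun c => !(c == " ")) ≤ cs.length := List.countP_le_length
    cases hc : (c == " ") <;> simp [hc, ih] ; omega

-- A's change condition equals "a gem occurs after a blank"
lemma changed_eq_moved (col : List String) :
    ((((col.filter (fun c => !(c == " "))).zip col).all (fun p => p.1 == p.2)) = false)
    ↔ pvGemAfterBlank col = true := by
  induction col with
  | nil => simp [pvGemAfterBlank]
  | cons c cs ih =>
    by_cases hc : c = " "
    · subst hc
      simp only [List.filter_cons, pvGemAfterBlank]
      rw [if_neg (by simp)]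
      cases hf : cs.filter (fun c => !(c == " ")) with
      | nil =>
        have hany : cs.any (fun d => !(d == " ")) = false := by
          rw [List.any_eq_false]
          intro d hd
          simpa using List.filter_eq_nil_iff.mp hf d hd
        simp [hany, pvGemAfterBlank_of_no_gem cs hany]
      | cons g gs' =>
        have hg : g ∈ cs ∧ (!(g == " ")) = true := by
          have : g ∈ cs.filter (fun c => !(c == " ")) := by
            rw [hf]; exact List.mem_cons_self ..
          exact List.mem_filter.mp this
        have hgne : (g == " ") = false := by simpa using hg.2
        have hany : cs.any (fun d => !(d == " ")) = true :=
          List.any_eq_true.mpr ⟨g, hg.1, hg.2⟩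
        simp [hgne, hany]
    · have hc' : (c == " ") = false := by simpa using hc
      simp only [List.filter_cons, pvGemAfterBlank, hc']
      rw [if_pos (by simp)]
      simp only [List.zip_cons_cons, List.all_cons, beq_self_eq_true, Bool.true_and,
        Bool.false_and, Bool.false_or]
      exact ih

-- when nothing dropped, the compacted column is the column itself
lemma compact_id (col : List String) (h : pvGemAfterBlank col = false) :
    col.filter (fun c => !(c == " ")) ++
      List.replicate (col.length - (col.filter (fun c => !(c == " "))).length) " " = col := by
  induction col with
  | nil => rfl
  | cons c cs ih =>
    simp only [pvGemAfterBlank, Bool.or_eq_false_iff, Bool.and_eq_false_iff] at h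
    by_cases hc : c = " "
    · subst hc
      have hany : cs.any (fun d => !(d == " ")) = false := by
        rcases h.1 with h1 | h1
        · simp at h1
        · exact h1
      have hfil : cs.filter (fun c => !(c == " ")) = [] := by
        rw [List.filter_eq_nil_iff]
        intro d hd
        have := List.any_eq_false.mp hany d hd
        simpa using this
      have hall : ∀ d ∈ cs, d = " " := by
        intro d hd
        have := List.any_eq_false.mp hany d hd
        simpa using this
      simp only [List.filter_cons, hfil]
      rw [if_neg (by simp)]
      simp only [List.nil_append, List.length_cons, List.length_nil,
        Nat.sub_zero, List.replicate_succ, List.cons.injEq]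
      refine ⟨by simp, (List.eq_replicate_iff.mpr ⟨rfl, hall⟩).symm⟩
    · have hc' : (c == " ") = false := by simpa using hc
      simp only [List.filter_cons, hc']
      rw [if_pos (by simp)]
      simpa using ih h.2

-- invariant of B's two-pointer loop: after j steps, write = #gems in col.take j,
-- moved = gem-after-blank in col.take j, prefix = compacted gems, suffix untouched
lemma loopB_inv (col : List String) (j : Nat) (hj : j ≤ col.length) :
    ∃ buf, (List.range j).foldl pvStepB (col, 0, false)
        = (buf, (col.take j).countP (fun s => !(s == " ")), pvGemAfterBlank (col.take j)) ∧
      buf.length = col.length ∧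
      buf.take ((col.take j).countP (fun s => !(s == " "))) = (col.take j).filter (fun s => !(s == " ")) ∧
      buf.drop j = col.drop j := by
  induction j with
  | zero => exact ⟨col, by simp [pvGemAfterBlank], rfl, by simp, rfl⟩
  | succ j ih =>
    obtain ⟨buf, heq, hlen, htake, hdrop⟩ := ih (Nat.le_of_succ_le hj)
    have hjlt : j < col.length := hj
    have hwle : (col.take j).countP (fun s => !(s == " ")) ≤ j := by
      have := List.countP_le_length (p := fun s => !(s == " ")) (l := col.take j)
      simpa [List.length_take, Nat.min_eq_left (Nat.le_of_succ_le hj)] using this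
    have hcell : buf[j]? = some col[j] := by
      have := congrArg (fun l => l[0]?) hdrop
      simpa [List.getElem?_drop, List.getElem?_eq_getElem hjlt] using this
    have htsucc : col.take (j + 1) = col.take j ++ [col[j]] := by
      rw [List.take_add_one, List.getElem?_eq_getElem hjlt]
      rfl
    have hdrop1 : buf.drop (j + 1) = col.drop (j + 1) := by
      have h1 : buf.drop (j+1) = (buf.drop j).drop 1 := by simp [List.drop_drop]
      have h2 : col.drop (j+1) = (col.drop j).drop 1 := by simp [List.drop_drop]
      rw [h1, h2, hdrop]
    rw [List.range_succ, List.foldl_append, heq, List.foldl_cons, List.foldl_nil]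
    simp only [pvStepB, List.getD_eq_getElem?_getD, hcell, Option.getD_some]
    by_cases hb : col[j] = " "
    · rw [if_pos (by simp [hb])]
      refine ⟨buf, ?_, hlen, ?_, hdrop1⟩
      · rw [htsucc, List.countP_append, pvGemAfterBlank_snoc]
        simp [hb]
      · rw [htsucc, List.countP_append, List.filter_append]
        simp [hb, htake]
    · have hb' : (col[j] == " ") = false := by simpa using hb
      have hwlen : (col.take j).countP (fun s => !(s == " ")) < buf.length := by omega
      rw [if_neg (by simp [hb'])]
      refine ⟨buf.set ((col.take j).countP (fun s => !(s == " "))) col[j], ?_, by simpa using hlen, ?_, ?_⟩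
      · refine Prod.ext rfl (Prod.ext ?_ ?_)
        · rw [htsucc, List.countP_append]
          simp [hb']
        · rw [htsucc, pvGemAfterBlank_snoc]
          have hany : (col.take j).any (fun c => c == " ")
              = decide (j ≠ (col.take j).countP (fun s => !(s == " "))) := by
            rw [any_blank_eq]
            simp only [List.length_take, Nat.min_eq_left (Nat.le_of_succ_le hj)]
            simp [ne_comm]
          simp only [hb', Bool.not_false, Bool.true_and, hany]
      · -- take (w+1) of buf.set w cell = filter(take j) ++ [cell]
        rw [htsucc, List.countP_append, List.filter_append]
        simp only [List.countP_cons, hb', Bool.not_false, List.countP_nil,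
          List.filter_cons, List.filter_nil]
        rw [List.set_eq_take_append_cons_drop, if_pos hwlen]
        have hlt : (buf.take ((col.take j).countP (fun s => !(s == " ")))).length
            = (col.take j).countP (fun s => !(s == " ")) := by
          simp [List.length_take]; omega
        rw [List.take_append, hlt]
        rw [List.take_of_length_le (le_of_eq_of_le hlt (by omega))]
        simp [htake]
      · rw [List.drop_set, if_pos (by omega)]
        exact hdrop1

-- setting an index back to the value Python indexing read there is the identity
lemma set_pyGet?_self {α : Type} (xs : List α) (x : Int) (v : α)
    (h : PySem.List.pyGet? xs x = some v) :
    xs.set (if x < 0 then x + (xs.length : Int) else x).toNat v = xs := by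
  unfold PySem.List.pyGet? PySem.List.pyIdx? at h
  split_ifs at h with h0 h1 h2
  · -- 0 ≤ x, x < len
    rw [if_neg (by omega)]
    have hv : xs[x.toNat]? = some v := by simpa using h
    have hlt : x.toNat < xs.length := by
      by_contra hc
      simp [List.getElem?_eq_none (by omega : xs.length ≤ x.toNat)] at hv
    rw [List.getElem?_eq_getElem hlt] at hv
    rw [← Option.some_inj.mp hv]
    exact List.set_getElem_self hlt
  · simp at h
  · -- x < 0, -len ≤ x
    rw [if_pos (by omega)]
    have hidx : (x + (xs.length : Int)).toNat = xs.length - (-x).toNat := by omega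
    rw [hidx]
    have hv : xs[xs.length - (-x).toNat]? = some v := by simpa using h
    have hlt : xs.length - (-x).toNat < xs.length := by
      by_contra hc
      simp [List.getElem?_eq_none (by omega : xs.length ≤ xs.length - (-x).toNat)] at hv
    rw [List.getElem?_eq_getElem hlt] at hv
    rw [← Option.some_inj.mp hv]
    exact List.set_getElem_self hlt
  · simp at h

theorem drop_gems_spec : Claim_equal_drop_gems := by
  intro gs cols _ _
  unfold Spec_drop_gems drop_gems drop_gems_alt
  have hstep : (fun (st : List (List String) × Bool) (x : Int) =>
      match PySem.List.pyGet? st.1 x with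
      | none => st
      | some col =>
        let nonempty := col.filter (fun cell => !(cell == " "))
        if ((nonempty.zip col).all (fun p => p.1 == p.2)) then st
        else
          let i := (if x < 0 then x + (st.1.length : Int) else x).toNat
          (st.1.set i (nonempty ++ List.replicate (col.length - nonempty.length) " "), true))
    = (fun (st : List (List String) × Bool) (x : Int) =>
      match PySem.List.pyGet? st.1 x with
      | none => st
      | some col =>
        let r := (List.range col.length).foldl pvStepB (col, 0, false)
        let i := (if x < 0 then x + (st.1.length : Int) else x).toNat
        (st.1.set i (r.1.take r.2.1 ++ List.replicate (col.length - r.2.1) " "), st.2 || r.2.2)) := by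
    funext st x
    cases hget : PySem.List.pyGet? st.1 x with
    | none => rfl
    | some col =>
      dsimp only
      obtain ⟨c, heq, hlen, htake, hdrop⟩ := loopB_inv col col.length (le_refl _)
      rw [heq]
      simp only [List.take_length] at htake ⊢
      have hcnt : (col.countP fun s => !(s == " ")) = (col.filter (fun c => !(c == " "))).length := by
        rw [List.countP_eq_length_filter]
      cases hgab : pvGemAfterBlank col with
      | false =>
        have hall : (((col.filter (fun c => !(c == " "))).zip col).all
            (fun p => p.1 == p.2)) = true := by
          cases h : (((col.filter (fun c => !(c == " "))).zip col).all (fun p => p.1 == p.2))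
          · exact absurd ((changed_eq_moved col).mp h) (by simp [hgab])
          · rfl
        rw [if_pos hall]
        rw [htake, hcnt, compact_id col hgab, set_pyGet?_self st.1 x col hget]
        simp
      | true =>
        have hall := (changed_eq_moved col).mpr hgab
        rw [if_neg (by simp [hall])]
        rw [htake, hcnt]
        simp
  rw [hstep]

-- ===== VERDICT (by name: the statement is the Claim_ definition above) =====
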